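-- pv_equiv track=rewrite | github.com/kirtan226/python-practice-programs | empty_square.py | empty_square_sequence
-- ===== SOURCE A (Python) =====
-- def empty_square_sequence(n):
--     new=[]
--     for i in range(1,n+1):
--         if len(new)==n:
--             break
--         a = ((i+1)**2 - i**2)
--         new.append(a)
--     return new
-- ===== SOURCE B (Python) =====
-- def empty_square_sequence(n):
--     # (i+1)**2 - i**2 == 2*i + 1, so the result is the odd numbers 3, 5, ..., 2*n+1.
--     return list(range(3, 2 * n + 2, 2))
-- ===== Notes on version B (the rewrite author's own statement) =====
-- stated objective: simpler
-- what changed: Replaced the per-element loop computing consecutive square differences with their closed form (consecutive odd numbers), built directly as one arithmetic-progression range call with no loop or squaring.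
import Mathlib
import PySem

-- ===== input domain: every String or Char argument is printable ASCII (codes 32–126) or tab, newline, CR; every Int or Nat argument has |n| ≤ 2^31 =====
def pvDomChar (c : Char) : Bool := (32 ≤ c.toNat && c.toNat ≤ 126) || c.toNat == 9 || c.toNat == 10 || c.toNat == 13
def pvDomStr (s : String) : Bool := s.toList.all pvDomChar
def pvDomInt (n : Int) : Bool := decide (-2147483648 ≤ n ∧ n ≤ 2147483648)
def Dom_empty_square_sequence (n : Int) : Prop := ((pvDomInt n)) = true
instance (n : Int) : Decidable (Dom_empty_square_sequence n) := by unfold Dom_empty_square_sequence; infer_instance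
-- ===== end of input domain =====

-- B replaces A's loop over i=1..n computing (i+1)**2 - i**2 by the closed-form
-- arithmetic progression range(3, 2n+2, 2) (objective: simpler).

-- ===== PORT A =====
-- the for-loop with its early 'break' when len(new) == n
def pvLoopA : List Int → List Int → Int → List Int
  | [], new, _ => new
  | i :: rest, new, n =>
      if (new.length : Int) = n then new
      else pvLoopA rest (new ++ [(i + 1) ^ 2 - i ^ 2]) n

def empty_square_sequence (n : Int) : List Int :=
  pvLoopA (PySem.List.pyRange 1 (n + 1) 1) [] n

-- ===== PORT B =====
def empty_square_sequence_alt (n : Int) : List Int :=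
  PySem.List.pyRange 3 (2 * n + 2) 2

-- ===== PRECONDITION & SPEC =====
def Spec_empty_square_sequence (n : Int) (out : List Int) : Prop := out = empty_square_sequence_alt n
instance (n : Int) (out : List Int) : Decidable (Spec_empty_square_sequence n out) := by unfold Spec_empty_square_sequence; infer_instance

-- ===== CLAIM =====
def Claim_equal_empty_square_sequence : Prop :=
  ∀ (n : Int), Dom_empty_square_sequence n → Spec_empty_square_sequence n (empty_square_sequence n)

-- ===== LEMMAS AND PROOFS =====
-- The break never fires while there are still appends left in budget:
-- the loop is just a map over the remaining indices.
theorem pvLoopA_no_break (l : List Int) (new : List Int) (n : Int)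
    (h : (new.length : Int) + l.length ≤ n) :
    pvLoopA l new n = new ++ l.map (fun i => (i + 1) ^ 2 - i ^ 2) := by
  induction l generalizing new with
  | nil => simp [pvLoopA]
  | cons i rest ih =>
      have hne : (new.length : Int) ≠ n := by
        simp only [List.length_cons] at h; push_cast at h ⊢; omega
      simp only [pvLoopA, if_neg hne]
      rw [ih (new ++ [(i + 1) ^ 2 - i ^ 2]) (by simp only [List.length_append, List.length_cons, List.length_nil] at h ⊢; push_cast at h ⊢; omega)]
      simp

theorem empty_square_sequence_eq (n : Int) :
    empty_square_sequence n = empty_square_sequence_alt n := by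
  unfold empty_square_sequence empty_square_sequence_alt
  by_cases h : n ≤ 0
  · rw [PySem.List.pyRange_one_eq_nil (by omega)]
    rw [PySem.List.pyRange_of_pos _ _ (by norm_num : (0:Int) < 2)]
    rw [if_neg (by omega)]
    simp [pvLoopA]
  · rw [pvLoopA_no_break _ _ _
      (by rw [PySem.List.length_pyRange_one]; simp; omega)]
    rw [PySem.List.pyRange_one, PySem.List.pyRange_of_pos _ _ (by norm_num : (0:Int) < 2)]
    rw [if_pos (by omega)]
    have hn : ((2 * n + 2 - 3 + 2 - 1) / 2).toNat = (n + 1 - 1).toNat := by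
      congr 1
      omega
    rw [hn, List.map_map]
    refine List.map_congr_left ?_
    intro k _
    simp only [Function.comp]
    ring

-- ===== VERDICT =====
theorem empty_square_sequence_spec : Claim_equal_empty_square_sequence := by
  intro n _
  exact empty_square_sequence_eq n
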